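-- pv_equiv track=rewrite | github.com/abolfazltorbat/time_series_prediction_multisteps | tools/PreProcessing.py | get_continuous_segments
-- ===== SOURCE A (Python) =====
-- def get_continuous_segments(indices):
--     """Get continuous segments from indices."""
--     segments = []
--     sorted_indices = sorted(indices)
--     if not sorted_indices:
--         return segments
--     start = sorted_indices[0]
--     prev = sorted_indices[0]
--     for idx in sorted_indices[1:]:
--         if idx == prev + 1:
--             prev = idx
--         else:
--             segments.append((start, prev))
--             start = idx
--             prev = idx
--     segments.append((start, prev))
--     return segments
-- ===== SOURCE B (Python) =====
-- from itertools import groupby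
--
-- def get_continuous_segments(indices):
--     """Get continuous segments from indices."""
--     sorted_indices = sorted(indices)
--     segments = []
--     for _, grp in groupby(enumerate(sorted_indices), key=lambda p: p[1] - p[0]):
--         g = list(grp)
--         segments.append((g[0][1], g[-1][1]))
--     return segments
-- ===== Notes on version B (the rewrite author's own statement) =====
-- stated objective: idiomatic
-- what changed: Replaces the explicit start/prev run-tracking loop with itertools.groupby over enumerate(sorted_indices) keyed by value-minus-position, which is constant exactly on consecutive runs; each group yields (first, last).
import Mathlib
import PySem

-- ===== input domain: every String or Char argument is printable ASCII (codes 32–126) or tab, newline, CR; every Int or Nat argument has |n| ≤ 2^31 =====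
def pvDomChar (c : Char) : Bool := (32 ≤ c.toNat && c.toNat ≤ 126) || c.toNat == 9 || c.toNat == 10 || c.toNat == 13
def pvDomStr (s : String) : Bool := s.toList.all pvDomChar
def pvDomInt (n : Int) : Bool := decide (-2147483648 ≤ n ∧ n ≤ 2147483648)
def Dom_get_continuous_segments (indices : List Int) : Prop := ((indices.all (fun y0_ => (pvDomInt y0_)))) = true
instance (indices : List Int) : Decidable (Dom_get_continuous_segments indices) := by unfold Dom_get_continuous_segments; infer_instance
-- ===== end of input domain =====

-- B replaces A's explicit start/prev run-tracking loop with a groupby over enumerate(sorted)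
-- keyed by value-minus-position (idiomatic; same asymptotic cost).

-- ===== PORT A =====
def get_continuous_segments (indices : List Int) : List (Int × Int) :=
  let segments : List (Int × Int) := []
  let sorted_indices := PySem.List.sorted indices id
  match sorted_indices with
  | [] => segments
  | h :: t =>
    let st := t.foldl (fun (st : List (Int × Int) × Int × Int) idx =>
      let (segments, start, prev) := st
      if idx = prev + 1 then (segments, start, idx)
      else (segments ++ [(start, prev)], idx, idx)) (segments, h, h)
    st.1 ++ [(st.2.1, st.2.2)]

-- ===== PORT B =====
-- itertools.groupby with an accumulator for the current group (cur is kept reversed;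
-- it is emitted as cur.reverse, matching groupby's left-to-right group contents).
def pyGroupByAux (key : Int × Int → Int) (cur : List (Int × Int)) (k : Int) :
    List (Int × Int) → List (List (Int × Int))
  | [] => [cur.reverse]
  | x :: xs =>
    if key x = k then pyGroupByAux key (x :: cur) k xs
    else cur.reverse :: pyGroupByAux key [x] (key x) xs

def pyGroupBy (key : Int × Int → Int) : List (Int × Int) → List (List (Int × Int))
  | [] => []
  | x :: xs => pyGroupByAux key [x] (key x) xs

def get_continuous_segments_alt (indices : List Int) : List (Int × Int) :=
  let sorted_indices := PySem.List.sorted indices id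
  (pyGroupBy (fun p => p.2 - p.1) (PySem.List.enumerate sorted_indices)).map
    (fun g => ((g.head?.getD (0, 0)).2, (g.getLast?.getD (0, 0)).2))

-- ===== PRECONDITION & SPEC =====
def Spec_get_continuous_segments (indices : List Int) (out : List (Int × Int)) : Prop := out = get_continuous_segments_alt indices
instance (indices : List Int) (out : List (Int × Int)) : Decidable (Spec_get_continuous_segments indices out) := by unfold Spec_get_continuous_segments; infer_instance

-- ===== CLAIM (what is proved, stated in full; the proofs are below) =====
def Claim_equal_get_continuous_segments : Prop := ∀ (indices : List Int), Dom_get_continuous_segments indices → Spec_get_continuous_segments indices (get_continuous_segments indices)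

-- ===== LEMMAS AND PROOFS =====

-- common recursive form: the run segmentation of start/prev followed by the tail
def pvCore (start prev : Int) : List Int → List (Int × Int)
  | [] => [(start, prev)]
  | idx :: rest =>
    if idx = prev + 1 then pvCore start idx rest
    else (start, prev) :: pvCore idx idx rest

def pvF (g : List (Int × Int)) : Int × Int :=
  ((g.head?.getD (0, 0)).2, (g.getLast?.getD (0, 0)).2)

theorem pvGetLast (c x : Int × Int) (cs : List (Int × Int)) :
    ((c :: cs).getLast?.getD x) = cs.getLast?.getD c := by
  induction cs using List.reverseRecOn with
  | nil => simp
  | append_singleton ds d _ =>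
    rw [← List.cons_append, List.getLast?_concat, List.getLast?_concat]; rfl

-- A's fold equals pvCore, prepended with the accumulated segments
theorem pvA_core (t : List Int) : ∀ (segments : List (Int × Int)) (start prev : Int),
    (let st := t.foldl (fun (st : List (Int × Int) × Int × Int) idx =>
        let (segments, start, prev) := st
        if idx = prev + 1 then (segments, start, idx)
        else (segments ++ [(start, prev)], idx, idx)) (segments, start, prev)
     st.1 ++ [(st.2.1, st.2.2)]) = segments ++ pvCore start prev t := by
  induction t with
  | nil => intro segments start prev; simp [pvCore]
  | cons idx rest ih =>
    intro segments start prev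
    simp only [List.foldl_cons, pvCore]
    by_cases h : idx = prev + 1
    · simp [h, ih]
    · simp [h, ih, List.append_assoc]

-- B's groupby over enumerate equals pvCore (cur nonempty, head value = prev, last value = start)
theorem pvB_core (t : List Int) : ∀ (m : Int) (c : Int × Int) (cs : List (Int × Int)),
    (pyGroupByAux (fun p => p.2 - p.1) (c :: cs) (c.2 - m + 1) (PySem.List.enumerate t m)).map pvF
      = pvCore (((c :: cs).getLast?).getD (0, 0)).2 c.2 t := by
  induction t with
  | nil =>
    intro m c cs
    simp only [PySem.List.enumerate_nil, pyGroupByAux, pvCore, pvF,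
      List.map_cons, List.map_nil, List.head?_reverse, List.getLast?_reverse]
    rw [pvGetLast]
    simp
  | cons idx rest ih =>
    intro m c cs
    rw [PySem.List.enumerate_cons]
    simp only [pyGroupByAux]
    by_cases h : idx = c.2 + 1
    · have hk : idx - m = c.2 - m + 1 := by omega
      rw [if_pos hk]
      have := ih (m + 1) (m, idx) (c :: cs)
      simp only [show (m, idx).2 - (m + 1) + 1 = c.2 - m + 1 by simp; omega] at this
      rw [this]
      simp [pvCore, h, List.getLast?_cons_cons]
    · have hk : ¬ (idx - m = c.2 - m + 1) := by omega
      rw [if_neg hk]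
      have := ih (m + 1) (m, idx) []
      simp only [show (m, idx).2 - (m + 1) + 1 = idx - m by simp; omega] at this
      simp only [List.map_cons, this]
      simp only [pvCore, if_neg h, pvF, List.head?_reverse, List.getLast?_reverse]
      rw [pvGetLast]
      simp

-- ===== VERDICT (by name: the statement is the Claim_ definition above) =====
theorem get_continuous_segments_spec : Claim_equal_get_continuous_segments := by
  intro indices _
  unfold Spec_get_continuous_segments get_continuous_segments get_continuous_segments_alt
  cases hs : PySem.List.sorted indices id with
  | nil => simp [pyGroupBy, PySem.List.enumerate_nil]
  | cons h t =>
    simp only []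
    rw [pvA_core t [] h h]
    rw [PySem.List.enumerate_cons, pyGroupBy]
    have hB := pvB_core t 1 (0, h) []
    simpa [pvF, sub_add_cancel] using hB.symm
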